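-- pv_equiv track=rewrite | github.com/dabrygo/puzzles | letter_replacement.py | attempt_words
-- ===== SOURCE A (Python) =====
-- from string import ascii_uppercase as ABC
--
-- def attempt_words(word):
--     '''Return a list of words that may or may not be real'''
--     # If 0 stands for 'use letter before' and 1 'use letter
--     # after', then the numbers from 0 to 2**n (where n is
--     # the length of a string) represent all possible
--     # translations, **if** each number is zero-padded to n places
--     # (e.g. "000" instead of "0" for n=3.
--     n = len(word)
--     options = [bin(i)[2:].zfill(n) for i in range(2**n)]
--     words = []
--     for i, option in enumerate(options):
--         new_word = ''
--         for j, c in enumerate(word):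
--             choice = option[j]
--             k = ABC.find(c)
--             if choice == '0':
--                 new_c = ABC[k-1]
--             else:
--                 # Wrap around if go past right end of list
--                 new_c = ABC[(k+1)%len(ABC)]
--             new_word += new_c
--         words.append(new_word)
--     return words
-- ===== SOURCE B (Python) =====
-- from string import ascii_uppercase as ABC
--
--
-- def attempt_words(word):
--     '''Return a list of words that may or may not be real'''
--     # Precompute, once per character, the pair (previous letter, next letter)
--     # with wraparound (ABC.find gives -1 for a char not in ABC, so "previous"
--     # is Y and "next" is A there, matching negative-index behaviour).
--     acc = ['']
--     for c in word:
--         k = ABC.find(c)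
--         pair = (ABC[(k - 1) % 26], ABC[(k + 1) % 26])
--         acc = [w + o for w in acc for o in pair]
--     return acc
-- ===== Notes on version B (the rewrite author's own statement) =====
-- stated objective: alternative
-- what changed: Replaces enumeration of 2^n integers with bin/zfill bit-string decoding and a per-position ABC.find/index lookup per generated word by an incremental cross-product fold: each character's (previous,next) letter pair is computed once and the result list is grown by extending every prefix with the two options, yielding the same words in the same order.
import Mathlib
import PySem

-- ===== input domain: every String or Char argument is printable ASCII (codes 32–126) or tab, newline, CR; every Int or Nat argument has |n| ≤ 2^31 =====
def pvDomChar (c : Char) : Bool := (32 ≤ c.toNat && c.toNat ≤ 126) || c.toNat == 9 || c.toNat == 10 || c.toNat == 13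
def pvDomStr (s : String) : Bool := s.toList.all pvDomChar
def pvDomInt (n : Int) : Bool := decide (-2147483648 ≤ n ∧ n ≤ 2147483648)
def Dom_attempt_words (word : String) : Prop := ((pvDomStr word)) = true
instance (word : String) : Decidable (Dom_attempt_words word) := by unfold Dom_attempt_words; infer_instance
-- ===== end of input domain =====

-- B replaces integer enumeration + bin/zfill bit decoding by an incremental cross-product fold
-- over the word's per-character (previous,next) letter pairs (objective: alternative algorithm,
-- same output list in the same order).

-- ===== PORT A =====
-- from string import ascii_uppercase as ABC
def pvABC : List Char := "ABCDEFGHIJKLMNOPQRSTUVWXYZ".toList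

def attempt_words (word : String) : List String :=
  let wl := word.toList
  let n := wl.length
  -- options = [bin(i)[2:].zfill(n) for i in range(2**n)]
  let options : List (List Char) :=
    (PySem.List.pyRange 0 ((2 : Int) ^ n) 1).map
      (fun i => PySem.Chars.zfill (PySem.List.slice (PySem.Int.toBinChars0b i) (some 2) none) (n : Int))
  -- for i, option in enumerate(options): … words.append(new_word)
  (PySem.List.enumerate options).foldl
    (fun words p =>
      let option := p.2
      -- for j, c in enumerate(word): new_word += new_c
      let new_word := (PySem.List.enumerate wl).foldl
        (fun nw q =>
          let choice := PySem.List.pyGetD option q.1 ' '   -- option[j]; j is always in range (len(option) ≥ n)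
          let k := PySem.Chars.find pvABC [q.2]
          let new_c := if choice == '0'
            then PySem.List.pyGetD pvABC (k - 1) 'A'        -- ABC[k-1]; k-1 ∈ [-2,24], always in range
            else PySem.List.pyGetD pvABC (PySem.Int.mod (k + 1) (pvABC.length : Int)) 'A'  -- ABC[(k+1)%26]
          nw ++ [new_c]) ([] : List Char)
      words ++ [String.ofList new_word]) []

-- ===== PORT B =====
def attempt_words_alt (word : String) : List String :=
  word.toList.foldl
    (fun acc c =>
      let k := PySem.Chars.find pvABC [c]
      let pair := (PySem.List.pyGetD pvABC (PySem.Int.mod (k - 1) 26) 'A',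
                   PySem.List.pyGetD pvABC (PySem.Int.mod (k + 1) 26) 'A')
      acc.flatMap (fun w => [w.push pair.1, w.push pair.2])) [""]

-- ===== PRECONDITION & SPEC =====
def Spec_attempt_words (word : String) (out : List String) : Prop := out = attempt_words_alt word
instance (word : String) (out : List String) : Decidable (Spec_attempt_words word out) := by unfold Spec_attempt_words; infer_instance

-- ===== CLAIM (what is proved, stated in full; the proofs are below) =====
def Claim_equal_attempt_words : Prop := ∀ (word : String), Dom_attempt_words word → Spec_attempt_words word (attempt_words word)

-- ===== LEMMAS AND PROOFS =====

-- the (previous, next) letter pair B computes for a character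
def pvPairB (c : Char) : Char × Char :=
  let k := PySem.Chars.find pvABC [c]
  (PySem.List.pyGetD pvABC (PySem.Int.mod (k - 1) 26) 'A',
   PySem.List.pyGetD pvABC (PySem.Int.mod (k + 1) 26) 'A')

-- the canonical result list: all choice words, '0'-branch first (big-endian counting order)
def pvCanon : List Char → List (List Char)
  | [] => [[]]
  | c :: cs => (pvCanon cs).map (fun t => (pvPairB c).1 :: t) ++ (pvCanon cs).map (fun t => (pvPairB c).2 :: t)

-- what A's inner loop computes from one option character
def pvConv (c ch : Char) : Char :=
  if ch == '0'
  then PySem.List.pyGetD pvABC (PySem.Chars.find pvABC [c] - 1) 'A'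
  else PySem.List.pyGetD pvABC (PySem.Int.mod (PySem.Chars.find pvABC [c] + 1) (pvABC.length : Int)) 'A'

-- bin(i)[2:] as a fuel-free recursion
def pvBinR (n : Nat) : List Char :=
  if n < 2 then [Nat.digitChar n]
  else pvBinR (n / 2) ++ [Nat.digitChar (n % 2)]
decreasing_by exact Nat.div_lt_self (by omega) (by omega)

-- the n-bit big-endian bit string of k
def pvBits : Nat → Nat → List Char
  | 0, _ => []
  | n + 1, k => (if k / 2 ^ n % 2 == 1 then '1' else '0') :: pvBits n (k % 2 ^ n)

lemma pvABC_len : pvABC.length = 26 := by decide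

lemma pvBits_length (n k : Nat) : (pvBits n k).length = n := by
  induction n generalizing k with
  | zero => rfl
  | succ n ih => simp [pvBits, ih]

lemma pvPush_append (w : String) (x : Char) (t : List Char) :
    w.push x ++ String.ofList t = w ++ String.ofList (x :: t) := by
  apply String.ext
  simp

-- B's fold builds acc × (all choice words)
lemma pvAlt_fold (cs : List Char) (acc : List String) :
    cs.foldl
      (fun acc c =>
        let k := PySem.Chars.find pvABC [c]
        let pair := (PySem.List.pyGetD pvABC (PySem.Int.mod (k - 1) 26) 'A',
                     PySem.List.pyGetD pvABC (PySem.Int.mod (k + 1) 26) 'A')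
        acc.flatMap (fun w => [w.push pair.1, w.push pair.2])) acc
    = acc.flatMap (fun w => (pvCanon cs).map (fun t => w ++ String.ofList t)) := by
  induction cs generalizing acc with
  | nil => simp [pvCanon]
  | cons c cs ih =>
    simp only [List.foldl_cons]
    rw [ih, List.flatMap_assoc]
    simp [pvCanon, pvPairB, pvPush_append, List.map_map, Function.comp_def]

lemma pvAlt_eq (word : String) :
    attempt_words_alt word = (pvCanon word.toList).map (fun t => String.ofList t) := by
  show word.toList.foldl _ [""] = _
  rw [pvAlt_fold]
  simp

-- ===== A-side =====

lemma pvToDigitsCore_append (f n : Nat) (ds : List Char) :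
    Nat.toDigitsCore 2 f n ds = Nat.toDigitsCore 2 f n [] ++ ds := by
  induction f generalizing n ds with
  | zero => simp [Nat.toDigitsCore]
  | succ f ih =>
    simp only [Nat.toDigitsCore]
    by_cases h : n / 2 = 0
    · simp [h]
    · rw [if_neg h, if_neg h, ih (n / 2) (Nat.digitChar (n % 2) :: ds),
        ih (n / 2) [Nat.digitChar (n % 2)]]
      simp

lemma pvToDigitsCore_eq (f n : Nat) (h : n < f) :
    Nat.toDigitsCore 2 f n [] = pvBinR n := by
  induction f generalizing n with
  | zero => omega
  | succ f ih =>
    rw [pvBinR]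
    simp only [Nat.toDigitsCore]
    by_cases h2 : n < 2
    · have hd : n / 2 = 0 := by omega
      have hm : n % 2 = n := by omega
      rw [if_pos h2, if_pos hd, hm]
    · have hd : n / 2 ≠ 0 := by omega
      have hlt : n / 2 < n := Nat.div_lt_self (by omega) (by omega)
      rw [if_neg h2, if_neg hd, pvToDigitsCore_append, ih (n / 2) (by omega)]

lemma pvToDigits_eq (n : Nat) : Nat.toDigits 2 n = pvBinR n :=
  pvToDigitsCore_eq (n + 1) n (by omega)

lemma pvBinR_ne_nil (n : Nat) : pvBinR n ≠ [] := by
  rw [pvBinR]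
  split_ifs <;> simp

lemma pvBinR_head (n : Nat) : (pvBinR n).head? = some '0' ∨ (pvBinR n).head? = some '1' := by
  induction n using Nat.strong_induction_on with
  | _ n ih =>
    rw [pvBinR]
    by_cases h2 : n < 2
    · interval_cases n
      · left; rfl
      · right; rfl
    · rw [if_neg h2]
      have hlt : n / 2 < n := Nat.div_lt_self (by omega) (by omega)
      rcases ih (n / 2) hlt with h | h <;>
        [left; right] <;> simp [List.head?_append, h]

lemma pvZfill_snoc (c : Char) (t : List Char) (d : Char) (n : Nat)
    (h0 : c ≠ '+') (h1 : c ≠ '-') :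
    PySem.Chars.zfill ((c :: t) ++ [d]) ((n : Int) + 1) = PySem.Chars.zfill (c :: t) (n : Int) ++ [d] := by
  have hs : ¬(c = '+' ∨ c = '-') := by simp [h0, h1]
  simp only [PySem.Chars.zfill, List.cons_append, if_neg hs]
  split_ifs with ha hb hc
  · rfl
  · exfalso; simp at ha hb; omega
  · exfalso; simp at ha hc; omega
  · have hc : ((n : Int) + 1).toNat - (c :: (t ++ [d])).length =
        (n : Int).toNat - (c :: t).length := by
      simp
    rw [hc]
    simp

lemma pvBits_snoc (n k : Nat) :
    pvBits (n + 1) k = pvBits n (k / 2) ++ [if k % 2 == 1 then '1' else '0'] := by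
  induction n generalizing k with
  | zero => simp [pvBits]
  | succ n ih =>
    have h1 : k / 2 ^ (n + 1) % 2 = k / 2 / 2 ^ n % 2 := by
      rw [Nat.div_div_eq_div_mul, ← Nat.pow_succ']
    have h2 : k % 2 ^ (n + 1) / 2 = k / 2 % 2 ^ n := by
      rw [Nat.pow_succ', Nat.mod_mul]
      omega
    have h3 : k % 2 ^ (n + 1) % 2 = k % 2 := Nat.mod_mod_of_dvd k (dvd_pow_self 2 (by omega))
    show _ :: pvBits (n + 1) (k % 2 ^ (n + 1)) = (_ :: pvBits n (k / 2 % 2 ^ n)) ++ _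
    rw [ih (k % 2 ^ (n + 1)), h1, h2, h3]
    simp

lemma pvZfill_pad (c : Char) (t : List Char) (n : Nat)
    (h0 : c ≠ '+') (h1 : c ≠ '-') (h : t.length + 1 ≤ n) :
    PySem.Chars.zfill (c :: t) ((n : Int) + 1) = '0' :: PySem.Chars.zfill (c :: t) (n : Int) := by
  have hs : ¬(c = '+' ∨ c = '-') := by simp [h0, h1]
  simp only [PySem.Chars.zfill, if_neg hs]
  split_ifs with ha hb hc
  · exfalso; simp at ha; omega
  · exfalso; simp at ha hb; omega
  · have h2 : ((n : Int) + 1).toNat - (c :: t).length = 1 := by simp at hc ⊢; omega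
    rw [h2]
    rfl
  · have h2 : ((n : Int) + 1).toNat - (c :: t).length
        = ((n : Int).toNat - (c :: t).length) + 1 := by simp at hc ⊢; omega
    rw [h2, List.replicate_succ]
    simp

lemma pvZfill_bits (n k : Nat) (hn : 1 ≤ n) (hk : k < 2 ^ n) :
    PySem.Chars.zfill (pvBinR k) (n : Int) = pvBits n k := by
  induction n generalizing k with
  | zero => omega
  | succ n ih =>
    have hcast : ((n + 1 : Nat) : Int) = (n : Int) + 1 := by push_cast; ring
    by_cases hn0 : n = 0
    · subst hn0
      interval_cases k
      · rw [pvBinR]; decide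
      · rw [pvBinR]; decide
    · have hn1 : 1 ≤ n := by omega
      have hpow : (2 : Nat) ^ (n + 1) = 2 * 2 ^ n := Nat.pow_succ'
      have hpow1 : 2 ≤ (2 : Nat) ^ n := by
        calc (2:Nat) = 2 ^ 1 := rfl
        _ ≤ 2 ^ n := Nat.pow_le_pow_right (by omega) hn1
      by_cases hk2 : k < 2
      · have hb : pvBinR k = [Nat.digitChar k] := by rw [pvBinR, if_pos hk2]
        have hd : Nat.digitChar k ≠ '+' ∧ Nat.digitChar k ≠ '-' := by
          interval_cases k <;> exact ⟨by decide, by decide⟩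
        rw [hb, hcast, pvZfill_pad _ [] n hd.1 hd.2 (by simp; omega), ← hb,
          ih k hn1 (by omega)]
        show _ = (if k / 2 ^ n % 2 == 1 then '1' else '0') :: pvBits n (k % 2 ^ n)
        rw [Nat.div_eq_of_lt (show k < 2 ^ n by omega),
          Nat.mod_eq_of_lt (show k < 2 ^ n by omega)]
        rfl
      · have hsnoc : pvBinR k = pvBinR (k / 2) ++ [Nat.digitChar (k % 2)] := by
          rw [pvBinR, if_neg (by omega)]
        obtain ⟨c0, t0, hct⟩ : ∃ c0 t0, pvBinR (k / 2) = c0 :: t0 := by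
          cases h : pvBinR (k / 2) with
          | nil => exact absurd h (pvBinR_ne_nil _)
          | cons a b => exact ⟨_, _, rfl⟩
        have hhead := pvBinR_head (k / 2)
        rw [hct] at hhead
        simp only [List.head?_cons, Option.some.injEq] at hhead
        have hc0 : c0 ≠ '+' ∧ c0 ≠ '-' := by
          rcases hhead with h | h <;> subst h <;> exact ⟨by decide, by decide⟩
        rw [hsnoc, hct, hcast, pvZfill_snoc c0 t0 _ n hc0.1 hc0.2, ← hct,
          ih (k / 2) hn1 (by omega), pvBits_snoc]
        have : k % 2 = 0 ∨ k % 2 = 1 := by omega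
        rcases this with h | h <;> rw [h] <;> rfl

lemma pvOpt_eq (n k : Nat) (hn : 1 ≤ n) (hk : k < 2 ^ n) :
    PySem.Chars.zfill (PySem.List.slice (PySem.Int.toBinChars0b (k : Int)) (some 2) none) (n : Int)
      = pvBits n k := by
  have h0 : ¬((k : Int) < 0) := by omega
  simp only [PySem.Int.toBinChars0b, if_neg h0, Int.toNat_natCast]
  rw [show PySem.List.slice ('0' :: 'b' :: Nat.toDigits 2 k) (some 2) none
      = Nat.toDigits 2 k from by simp [PySem.List.slice]]
  rw [pvToDigits_eq, pvZfill_bits n k hn hk]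

lemma pvDecode_zip (cs o : List Char) (h : cs.length ≤ o.length) :
    (PySem.List.enumerate cs).map (fun q => pvConv q.2 (PySem.List.pyGetD o q.1 ' '))
      = List.zipWith pvConv cs o := by
  apply List.ext_getElem
  · simp [PySem.List.length_enumerate]; omega
  · intro i h1 h2
    simp only [List.getElem_map, PySem.List.getElem_enumerate, List.getElem_zipWith,
      zero_add, PySem.List.pyGetD_natCast]
    rw [List.getD_eq_getElem o ' ' (by simp [PySem.List.length_enumerate] at h1; omega)]

lemma pvConv_zero (c : Char) : pvConv c '0' = (pvPairB c).1 := by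
  have hk1 := PySem.Chars.neg_one_le_find pvABC [c]
  have hk2 := PySem.Chars.find_le_length pvABC [c]
  rw [pvABC_len] at hk2
  simp only [pvConv, pvPairB]
  rw [if_pos (by decide)]
  set k := PySem.Chars.find pvABC [c] with hkdef
  by_cases h : 0 ≤ k - 1
  · have hm : PySem.Int.mod (k - 1) 26 = k - 1 := by
      show (k - 1).fmod 26 = k - 1
      rw [Int.fmod_eq_emod, if_pos (Or.inl (by omega)), Int.emod_eq_of_lt h (by omega)]
      omega
    rw [hm]
  · have : k = -1 ∨ k = 0 := by omega
    rcases this with h' | h' <;> rw [h'] <;> decide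

lemma pvConv_one (c : Char) : pvConv c '1' = (pvPairB c).2 := by
  simp only [pvConv, pvPairB, pvABC_len]
  rw [if_neg (by decide)]
  norm_num

lemma pvMap_canon (cs : List Char) :
    (List.range (2 ^ cs.length)).map (fun k => List.zipWith pvConv cs (pvBits cs.length k))
      = pvCanon cs := by
  induction cs with
  | nil => simp [pvCanon, pvBits]
  | cons c cs ih =>
    have h2 : 2 ^ (c :: cs).length = 2 ^ cs.length + 2 ^ cs.length := by
      rw [List.length_cons, Nat.pow_succ]; omega
    have hpos : 0 < 2 ^ cs.length := Nat.two_pow_pos _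
    rw [h2, List.range_add]
    simp only [List.map_append, List.map_map]
    show _ ++ _ = _ ++ _
    congr 1
    · rw [← ih, List.map_map]
      apply List.map_congr_left
      intro k hk
      rw [List.mem_range] at hk
      show List.zipWith pvConv (c :: cs)
          ((if k / 2 ^ cs.length % 2 == 1 then '1' else '0') :: pvBits cs.length (k % 2 ^ cs.length)) = _
      rw [Nat.div_eq_of_lt hk, Nat.mod_eq_of_lt hk]
      simp only [List.zipWith_cons_cons, Function.comp_apply]
      rw [show ((if (0:Nat) % 2 == 1 then '1' else '0') = '0') from rfl, pvConv_zero]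
    · rw [← ih, List.map_map]
      apply List.map_congr_left
      intro k hk
      rw [List.mem_range] at hk
      show List.zipWith pvConv (c :: cs)
          ((if (2 ^ cs.length + k) / 2 ^ cs.length % 2 == 1 then '1' else '0')
            :: pvBits cs.length ((2 ^ cs.length + k) % 2 ^ cs.length)) = _
      rw [Nat.add_comm (2 ^ cs.length) k, Nat.add_div_right k hpos, Nat.add_mod_right,
        Nat.div_eq_of_lt hk, Nat.mod_eq_of_lt hk]
      simp only [List.zipWith_cons_cons]
      rw [show ((if (0 + 1) % 2 == 1 then '1' else '0') = '1') from rfl, pvConv_one]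
      rfl

lemma pvMap_enum_snd {α β : Type} (xs : List α) (g : α → β) :
    (PySem.List.enumerate xs).map (fun p => g p.2) = xs.map g := by
  conv_rhs => rw [← PySem.List.map_snd_enumerate xs 0]
  rw [List.map_map]
  rfl

lemma pvA_core (cs : List Char) (hn1 : 1 ≤ cs.length) :
    (PySem.List.enumerate ((PySem.List.pyRange 0 ((2 : Int) ^ cs.length) 1).map
      (fun i => PySem.Chars.zfill (PySem.List.slice (PySem.Int.toBinChars0b i) (some 2) none)
        (cs.length : Int)))).foldl
      (fun words p =>
        words ++ [String.ofList ((PySem.List.enumerate cs).foldl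
          (fun nw q =>
            nw ++ [if PySem.List.pyGetD p.2 q.1 ' ' == '0'
              then PySem.List.pyGetD pvABC (PySem.Chars.find pvABC [q.2] - 1) 'A'
              else PySem.List.pyGetD pvABC
                (PySem.Int.mod (PySem.Chars.find pvABC [q.2] + 1) (pvABC.length : Int)) 'A'])
          ([] : List Char))]) []
    = (pvCanon cs).map (fun t => String.ofList t) := by
  simp only [PySem.List.foldl_append_singleton_eq_map, List.nil_append]
  rw [pvMap_enum_snd _ (fun option => String.ofList ((PySem.List.enumerate cs).map
    (fun q => if PySem.List.pyGetD option q.1 ' ' == '0'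
      then PySem.List.pyGetD pvABC (PySem.Chars.find pvABC [q.2] - 1) 'A'
      else PySem.List.pyGetD pvABC
        (PySem.Int.mod (PySem.Chars.find pvABC [q.2] + 1) (pvABC.length : Int)) 'A'))),
    PySem.List.pyRange_one, List.map_map]
  have hN : ((2 : Int) ^ cs.length - 0).toNat = 2 ^ cs.length := by
    rw [sub_zero, show ((2 : Int) ^ cs.length) = ((2 ^ cs.length : Nat) : Int) from by
      push_cast; ring, Int.toNat_natCast]
  rw [hN, ← pvMap_canon cs, List.map_map, List.map_map]
  apply List.map_congr_left
  intro k hk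
  rw [List.mem_range] at hk
  simp only [Function.comp_apply, zero_add]
  rw [pvOpt_eq cs.length k hn1 hk]
  exact congrArg String.ofList (pvDecode_zip cs (pvBits cs.length k) (by rw [pvBits_length]))

lemma pvA_eq (word : String) :
    attempt_words word = (pvCanon word.toList).map (fun t => String.ofList t) := by
  by_cases hw : word.toList = []
  · simp only [attempt_words, hw]
    decide
  · have hn1 : 1 ≤ word.toList.length := by
      cases h : word.toList with
      | nil => exact absurd h hw
      | cons a b => simp
    exact pvA_core word.toList hn1

-- ===== VERDICT (by name: the statement is the Claim_ definition above) =====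
theorem attempt_words_spec : Claim_equal_attempt_words := by
  intro word _
  show attempt_words word = attempt_words_alt word
  rw [pvA_eq, pvAlt_eq]
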